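-- pv_equiv track=rewrite | github.com/TilenKelc/UvR_10_vaja | test_nizi.py | najdaljse_besede
-- ===== SOURCE A (Python) =====
-- def najdaljse_besede(s):
--     najdalse = f""
--     max = 0
--     for beseda in s.split():
--         if len(beseda)>max:
--             max = len(beseda)
--     for beseda in s.split():
--         if len(beseda) == max:
--             najdalse += f"{beseda}, "
--     return najdalse[:-2]
-- ===== SOURCE B (Python) =====
-- def najdaljse_besede(s):
--     # single pass: maintain the running maximum and the current winners
--     best = -1
--     winners = []
--     for w in s.split():
--         n = len(w)
--         if n > best:
--             best = n
--             winners = [w]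
--         elif n == best:
--             winners.append(w)
--     return ", ".join(winners)
-- ===== Notes on version B (the rewrite author's own statement) =====
-- stated objective: simpler
-- what changed: Replaces A's two passes over s.split() (max-finding pass, then collect-and-strip-trailing-separator pass with string slicing) by a single pass keeping the running max and the current winners, joined at the end.
import Mathlib
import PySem

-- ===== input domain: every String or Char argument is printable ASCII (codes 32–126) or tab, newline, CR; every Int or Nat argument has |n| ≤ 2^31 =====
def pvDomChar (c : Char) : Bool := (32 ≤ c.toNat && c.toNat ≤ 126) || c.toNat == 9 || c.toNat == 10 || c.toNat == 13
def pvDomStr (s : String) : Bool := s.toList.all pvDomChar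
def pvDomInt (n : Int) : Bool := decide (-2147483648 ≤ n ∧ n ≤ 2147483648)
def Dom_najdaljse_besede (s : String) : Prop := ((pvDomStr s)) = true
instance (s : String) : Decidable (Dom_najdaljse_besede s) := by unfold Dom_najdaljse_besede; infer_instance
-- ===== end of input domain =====

-- B replaces A's two passes (find the max, then re-collect with a trailing-", " strip)
-- by a single pass keeping the running max and current winners; same values, simpler.

-- ===== PORT A =====
-- A, step for step: first loop finds max word length (init 0), second loop appends
-- every word of that length followed by ", ", then the result is sliced [:-2].
def najdaljse_besede (s : String) : String :=
  let ws := PySem.Chars.split₀ s.toList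
  let mx := ws.foldl (fun m b => if (b.length : Int) > m then (b.length : Int) else m) 0
  let najdalse := ws.foldl
      (fun acc b => if (b.length : Int) = mx then acc ++ b ++ [',', ' '] else acc) []
  String.ofList (PySem.List.slice najdalse none (some (-2)))

-- ===== PORT B =====
-- Source B, step for step: one fold over the words with state (best, winners), then join.
def najdaljse_besede_alt (s : String) : String :=
  let r := (PySem.Chars.split₀ s.toList).foldl
      (fun (st : Int × List (List Char)) w =>
        if (w.length : Int) > st.1 then ((w.length : Int), [w])
        else if (w.length : Int) = st.1 then (st.1, st.2 ++ [w])
        else st)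
      (-1, [])
  String.ofList (PySem.Chars.join [',', ' '] r.2)

-- ===== PRECONDITION & SPEC =====
def Spec_najdaljse_besede (s : String) (out : String) : Prop := out = najdaljse_besede_alt s
instance (s : String) (out : String) : Decidable (Spec_najdaljse_besede s out) := by unfold Spec_najdaljse_besede; infer_instance

-- ===== CLAIM (what is proved, stated in full; the proofs are below) =====
def Claim_equal_najdaljse_besede : Prop := ∀ (s : String), Dom_najdaljse_besede s → Spec_najdaljse_besede s (najdaljse_besede s)

-- ===== LEMMAS AND PROOFS =====

-- running maximum of word lengths, with B's initial value -1
def pvM (ws : List (List Char)) : Int :=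
  ws.foldl (fun m w => max m ((w.length : Int))) (-1)

theorem pvM_append_singleton (ws : List (List Char)) (w : List Char) :
    pvM (ws ++ [w]) = max (pvM ws) ((w.length : Int)) := by
  simp [pvM]

theorem pv_foldl_max_shift (ws : List (List Char)) :
    ∀ a : Int, -1 ≤ a →
      ws.foldl (fun m w => max m ((w.length : Int))) a = max a (pvM ws) := by
  induction ws with
  | nil => intro a ha; simp [pvM]; omega
  | cons w ws ih =>
    intro a ha
    have h1 := ih (max a (w.length : Int)) (by omega)
    have h2 := ih (max (-1) (w.length : Int)) (by omega)
    simp only [pvM, List.foldl_cons] at *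
    rw [h1, h2]; omega

theorem pv_le_M (ws : List (List Char)) : ∀ w ∈ ws, ((w.length : Int)) ≤ pvM ws := by
  induction ws using List.reverseRecOn with
  | nil => simp
  | append_singleton ws w ih =>
    intro x hx
    rw [pvM_append_singleton]
    rcases List.mem_append.mp hx with h | h
    · exact le_trans (ih x h) (le_max_left _ _)
    · simp at h; subst h; exact le_max_right _ _

theorem pvM_nonneg (ws : List (List Char)) (h : ws ≠ []) : 0 ≤ pvM ws := by
  rcases ws with _ | ⟨w, ws⟩
  · exact absurd rfl h
  · have := pv_le_M (w :: ws) w (by simp)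
    omega

-- A's max loop computes max 0 (pvM ws)
theorem pv_A_max (ws : List (List Char)) :
    ws.foldl (fun m b => if ((b.length : Int)) > m then ((b.length : Int)) else m) 0
      = max 0 (pvM ws) := by
  have hstep : (fun (m : Int) (b : List Char) =>
      if ((b.length : Int)) > m then ((b.length : Int)) else m)
      = fun m b => max m ((b.length : Int)) := by
    funext m b; split <;> omega
  rw [hstep]
  exact pv_foldl_max_shift ws 0 (by omega)

-- B's single pass returns the max together with the words of that length, in order
theorem pv_B_fold (ws : List (List Char)) :
    ws.foldl
      (fun (st : Int × List (List Char)) w =>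
        if (w.length : Int) > st.1 then ((w.length : Int), [w])
        else if (w.length : Int) = st.1 then (st.1, st.2 ++ [w])
        else st)
      (-1, [])
    = (pvM ws, ws.filter (fun w => decide ((w.length : Int) = pvM ws))) := by
  induction ws using List.reverseRecOn with
  | nil => simp [pvM]
  | append_singleton ws w ih =>
    rw [List.foldl_append, ih, pvM_append_singleton, List.filter_append]
    have hle := pv_le_M ws
    by_cases hgt : ((w.length : Int)) > pvM ws
    · have hmax : max (pvM ws) ((w.length : Int)) = (w.length : Int) := by omega
      rw [hmax]
      have hnil : ws.filter (fun x => decide ((x.length : Int) = (w.length : Int))) = [] := by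
        rw [List.filter_eq_nil_iff]
        intro x hx
        have := hle x hx
        simp; omega
      simp only [List.foldl_cons, List.foldl_nil]
      rw [if_pos hgt, hnil]
      simp
    · have hmax : max (pvM ws) ((w.length : Int)) = pvM ws := by omega
      rw [hmax]
      simp only [List.foldl_cons, List.foldl_nil]
      rw [if_neg hgt]
      by_cases heq : ((w.length : Int)) = pvM ws
      · rw [if_pos heq]; simp [heq]
      · rw [if_neg heq]; simp [heq]

-- A's collection loop is a flatMap over the filtered words
theorem pv_A_collect (t : Int) (ws : List (List Char)) (acc : List Char) :
    ws.foldl (fun acc b => if ((b.length : Int)) = t then acc ++ b ++ [',', ' '] else acc) acc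
      = acc ++ (ws.filter (fun b => decide ((b.length : Int) = t))).flatMap
          (fun b => b ++ [',', ' ']) := by
  induction ws generalizing acc with
  | nil => simp
  | cons w ws ih =>
    simp only [List.foldl_cons, List.filter_cons]
    by_cases h : ((w.length : Int)) = t
    · rw [if_pos h]; simp only [h, decide_true]
      rw [ih]; simp
    · rw [if_neg h]; simp only [h, decide_false]
      rw [ih]; simp

-- stripping the trailing ", " from the concatenation gives the ", "-join
theorem pv_slice_join (vs : List (List Char)) :
    PySem.List.slice (vs.flatMap (fun b => b ++ [',', ' '])) none (some (-2))
      = PySem.Chars.join [',', ' '] vs := by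
  induction vs with
  | nil => simp [PySem.Chars.join_nil, PySem.List.slice_to_neg_ofNat _ 2 (by omega)]
  | cons w vs ih =>
    rcases vs with _ | ⟨v, vs⟩
    · rw [PySem.List.slice_to_neg_ofNat _ 2 (by omega), PySem.Chars.join_singleton]
      simp
    · have hr : 2 ≤ ((v :: vs).flatMap (fun b => b ++ [',', ' '])).length := by
        simp [List.length_flatMap]; omega
      rw [PySem.List.slice_to_neg_ofNat _ 2 (by omega)] at ih ⊢
      rw [PySem.Chars.join_cons_cons, ← ih]
      rw [List.flatMap_cons]
      generalize (v :: vs).flatMap (fun b => b ++ [',', ' ']) = rest at hr ⊢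
      rw [List.take_append]
      have h1 : (w ++ [',', ' ']).length ≤ (w ++ [',', ' '] ++ rest).length - 2 := by
        simp; omega
      rw [List.take_of_length_le h1]
      congr 1
      simp
      omega

-- ===== VERDICT (by name: the statement is the Claim_ definition above) =====
theorem najdaljse_besede_spec : Claim_equal_najdaljse_besede := by
  intro s _
  unfold Spec_najdaljse_besede najdaljse_besede najdaljse_besede_alt
  simp only
  rw [pv_B_fold, pv_A_max]
  rcases h : PySem.Chars.split₀ s.toList with _ | ⟨w, ws⟩
  · simp [PySem.Chars.join_nil, PySem.List.slice_to_neg_ofNat _ 2 (by omega)]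
  · have hmax : max 0 (pvM (w :: ws)) = pvM (w :: ws) := by
      have := pvM_nonneg (w :: ws) (by simp)
      omega
    rw [hmax]
    have hA := pv_A_collect (pvM (w :: ws)) (w :: ws) []
    have hstep : (fun (acc : List Char) (b : List Char) =>
        if ((b.length : Int)) = pvM (w :: ws) then acc ++ b ++ [',', ' '] else acc)
        = fun acc b => if ((b.length : Int)) = pvM (w :: ws) then acc ++ (b ++ [',', ' ']) else acc := by
      funext acc b; split <;> simp
    rw [hA]
    simp only [List.nil_append]
    rw [pv_slice_join]
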